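-- pv_equiv track=rewrite | github.com/leonhx/leetcode-practice | 90.subsets-ii.py | gen_iter
-- ===== SOURCE A (Python) =====
-- from typing import List
--
-- def gen_iter(ns: List[List[int]]) -> List[List[int]]:
--     leading_sets = [[]]
--     if not ns:
--         return leading_sets
--     for i in range(len(ns)):
--         new_sets = leading_sets[:]
--         n, c = ns[i]
--         for rep in range(1, c + 1):
--             new_sets += [s + [n] * rep for s in leading_sets]
--         leading_sets = new_sets
--     return leading_sets
-- ===== SOURCE B (Python) =====
-- from typing import List
--
-- def gen_iter(ns: List[List[int]]) -> List[List[int]]: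
--     def build(i: int) -> List[List[int]]:
--         if i < 0:
--             return [[]]
--         n, c = ns[i]
--         rest = build(i - 1)
--         return [prefix + [n] * rep for rep in range(max(c, 0) + 1) for prefix in rest]
--     return build(len(ns) - 1)
-- ===== Notes on version B (the rewrite author's own statement) =====
-- stated objective: alternative
-- what changed: Replaces A's forward loop that copies the accumulator and appends extended copies group by group with a back-to-front recursive cartesian-product construction: each pair contributes repetition counts 0..c and the subset lists are built by a single flat comprehension over (rep, prefix).
import Mathlib
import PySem

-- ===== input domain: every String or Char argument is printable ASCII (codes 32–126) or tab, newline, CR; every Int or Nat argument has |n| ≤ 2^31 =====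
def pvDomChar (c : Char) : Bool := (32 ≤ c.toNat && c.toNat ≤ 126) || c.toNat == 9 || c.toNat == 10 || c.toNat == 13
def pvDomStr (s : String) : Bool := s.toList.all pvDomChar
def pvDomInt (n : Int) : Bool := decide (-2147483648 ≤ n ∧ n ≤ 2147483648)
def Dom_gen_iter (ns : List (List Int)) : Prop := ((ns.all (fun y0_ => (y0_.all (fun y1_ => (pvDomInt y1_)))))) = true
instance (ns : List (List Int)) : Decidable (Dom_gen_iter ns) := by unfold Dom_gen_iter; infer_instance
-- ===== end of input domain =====

-- B rebuilds the subsets as a back-to-front recursive cartesian product instead of A's forward group-appending loop; equal on all inputs whose pairs have exactly two elements (A raises on others).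


-- ===== PORT A =====
def gen_iter (ns : List (List Int)) : List (List Int) :=
  let leading_sets : List (List Int) := [[]]
  if ns.isEmpty then leading_sets
  else
    (PySem.List.pyRange 0 (ns.length : Int) 1).foldl
      (fun leading_sets i =>
        match PySem.List.pyGet? ns i with
        | some [n, c] =>
            (PySem.List.pyRange 1 (c + 1) 1).foldl
              (fun new_sets rep =>
                new_sets ++ leading_sets.map (fun s => s ++ List.replicate rep.toNat n))
              leading_sets
        | _ => leading_sets)  -- unreachable under Pre_ (pair not of length 2: Python raises)
      leading_sets

-- ===== PORT B =====
-- build(i) of Source B, shifted by one: genIterBuild ns (i+1) = build(i), genIterBuild ns 0 = build(-1)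
def genIterBuild (ns : List (List Int)) : Nat → List (List Int)
  | 0 => [[]]
  | k + 1 =>
    let rest := genIterBuild ns k
    match PySem.List.pyGet? ns (k : Int) with
    | none => rest  -- unreachable under Pre_ (Python raises)
    | some p =>
      if hp : p.length = 2 then  -- 'n, c = ns[i]': a pair under Pre_
        let n := p[0]'(by omega)
        let c := p[1]'(by omega)
        (PySem.List.pyRange 0 (max c 0 + 1) 1).flatMap
          (fun rep => rest.map (fun pre => pre ++ List.replicate rep.toNat n))
      else rest  -- unreachable under Pre_ (Python raises)

def gen_iter_alt (ns : List (List Int)) : List (List Int) := genIterBuild ns ns.length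

-- ===== PRECONDITION & SPEC =====
-- Pre_ excludes exactly the inputs on which Python A raises ValueError: a pair 'n, c = ns[i]' of length ≠ 2.
def Pre_gen_iter (ns : List (List Int)) : Prop := ∀ p ∈ ns, p.length = 2
instance (ns : List (List Int)) : Decidable (Pre_gen_iter ns) := by unfold Pre_gen_iter; infer_instance
def pvWitness_gen_iter : List (List Int) := [[1, 2], [0, 1]]

def Spec_gen_iter (ns : List (List Int)) (out : List (List Int)) : Prop := out = gen_iter_alt ns
instance (ns : List (List Int)) (out : List (List Int)) : Decidable (Spec_gen_iter ns out) := by unfold Spec_gen_iter; infer_instance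

-- ===== CLAIM (what is proved, stated in full; the proofs are below) =====
def Claim_equal_gen_iter : Prop := ∀ (ns : List (List Int)), Dom_gen_iter ns → Pre_gen_iter ns → Spec_gen_iter ns (gen_iter ns)

-- ===== LEMMAS AND PROOFS =====

-- A's inner loop (appending one group per rep = 1..c) equals B's flat comprehension over rep = 0..max c 0.
theorem step_eq (ls : List (List Int)) (n c : Int) :
    (PySem.List.pyRange 1 (c + 1) 1).foldl
      (fun new_sets rep => new_sets ++ ls.map (fun s => s ++ List.replicate rep.toNat n)) ls
    = (PySem.List.pyRange 0 (max c 0 + 1) 1).flatMap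
        (fun rep => ls.map (fun pre => pre ++ List.replicate rep.toNat n)) := by
  have hrange : PySem.List.pyRange 1 (max c 0 + 1) 1 = PySem.List.pyRange 1 (c + 1) 1 := by
    by_cases h : c ≤ 0
    · rw [max_eq_right h, PySem.List.pyRange_one_eq_nil (by omega),
        PySem.List.pyRange_one_eq_nil (by omega)]
    · rw [max_eq_left (by omega : (0:Int) ≤ c)]
  rw [PySem.List.foldl_append_eq_flatMap,
    PySem.List.pyRange_one_cons (by omega : (0:Int) < max c 0 + 1)]
  simp only [zero_add, hrange, List.flatMap_cons, Int.toNat_zero, List.replicate_zero,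
    List.append_nil, List.map_id']

-- the loop over the first k indices of A equals B's recursion
theorem build_eq (ns : List (List Int)) (k : Nat) (hk : k ≤ ns.length) :
    (PySem.List.pyRange 0 (k : Int) 1).foldl
      (fun leading_sets i =>
        match PySem.List.pyGet? ns i with
        | some [n, c] =>
            (PySem.List.pyRange 1 (c + 1) 1).foldl
              (fun new_sets rep =>
                new_sets ++ leading_sets.map (fun s => s ++ List.replicate rep.toNat n))
              leading_sets
        | _ => leading_sets)
      [[]]
    = genIterBuild ns k := by
  induction k with
  | zero => simp [PySem.List.pyRange_one_eq_nil, genIterBuild]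
  | succ m ih =>
    rw [show ((m + 1 : Nat) : Int) = (m : Int) + 1 by push_cast; ring,
      PySem.List.pyRange_one_succ_right (by positivity), List.foldl_append,
      ih (by omega)]
    simp only [List.foldl_cons, List.foldl_nil, genIterBuild]
    rcases h : PySem.List.pyGet? ns (m : Int) with _ | p
    · rfl
    · rcases p with _ | ⟨n, _ | ⟨c, _ | _⟩⟩
      · rfl
      · rfl
      · exact step_eq (genIterBuild ns m) n c
      · simp

theorem gen_iter_spec : Claim_equal_gen_iter := by
  intro ns _ _
  unfold Spec_gen_iter gen_iter gen_iter_alt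
  rcases hns : ns with _ | ⟨p, rest⟩
  · simp [genIterBuild]
  · rw [← hns]
    have : ns.isEmpty = false := by rw [hns]; rfl
    simp only [this, Bool.false_eq_true]
    exact build_eq ns ns.length le_rfl
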